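-- pv_equiv track=rewrite | github.com/justinstimatze/score | compile_strips.py | parse_permission
-- ===== SOURCE A (Python) =====
-- def parse_permission(perm_text: str) -> str:
--     if not perm_text:
--         return "prm:S"
--     t = perm_text.lower()
--     mode = "Q" if any(w in t for w in ["requires", "sequenced", "prior", "cannot standalone",
--                                         "not standalone", "only after", "must follow"]) else "S"
--     # Grant inference
--     grant = ""
--     if "grants" in t:
--         grants_part = t[t.index("grants"):]
--         if any(w in grants_part for w in ["escalat", "intensit"]):
--             grant = "esc"
--         elif any(w in grants_part for w in ["trust", "channel"]):
--             grant = "trt"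
--         elif any(w in grants_part for w in ["identity", "self-concept", "shift"]):
--             grant = "ids"
--         elif any(w in grants_part for w in ["closure", "resolution", "path"]):
--             grant = "cls"
--         elif any(w in grants_part for w in ["surveil", "ambient"]):
--             grant = "asr"
--         elif any(w in grants_part for w in ["contact", "ongoing", "continued"]):
--             grant = "sct"
--         elif any(w in grants_part for w in ["solved", "victory", "won"]):
--             grant = "slv"
--         elif any(w in grants_part for w in ["knowledge", "knows", "learned",
--                                              "experienced", "understanding"]):
--             grant = "klg"
--     return f"prm:{mode}" + (f"→{grant}" if grant else "")
-- ===== SOURCE B (Python) =====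
-- MODE_WORDS = ["requires", "sequenced", "prior", "cannot standalone",
--               "not standalone", "only after", "must follow"]
--
-- # Flat keyword->code pairs; matching is done in one full pass with no priority logic.
-- GRANT_KEYWORDS = [
--     ("escalat", "esc"), ("intensit", "esc"),
--     ("trust", "trt"), ("channel", "trt"),
--     ("identity", "ids"), ("self-concept", "ids"), ("shift", "ids"),
--     ("closure", "cls"), ("resolution", "cls"), ("path", "cls"),
--     ("surveil", "asr"), ("ambient", "asr"),
--     ("contact", "sct"), ("ongoing", "sct"), ("continued", "sct"),
--     ("solved", "slv"), ("victory", "slv"), ("won", "slv"),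
--     ("knowledge", "klg"), ("knows", "klg"), ("learned", "klg"),
--     ("experienced", "klg"), ("understanding", "klg"),
-- ]
-- # Priority order used in a second, separate selection pass over codes.
-- GRANT_ORDER = ["esc", "trt", "ids", "cls", "asr", "sct", "slv", "klg"]
--
--
-- def parse_permission(perm_text: str) -> str:
--     if not perm_text:
--         return "prm:S"
--     t = perm_text.lower()
--     mode = "Q" if any(w in t for w in MODE_WORDS) else "S"
--     grant = ""
--     if "grants" in t:
--         grants_part = t[t.index("grants"):]
--         # Phase 1: collect every matching grant code (no ordering logic here).
--         matched = [code for kw, code in GRANT_KEYWORDS if kw in grants_part]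
--         # Phase 2: pick the highest-priority code among those collected.
--         grant = next((c for c in GRANT_ORDER if c in matched), "")
--     return f"prm:{mode}" + (f"\u2192{grant}" if grant else "")
-- ===== Notes on version B (the rewrite author's own statement) =====
-- stated objective: alternative
-- what changed: A's prioritised if/elif short-circuit grant chain is replaced by two separate passes: first collect every matching grant code from a flat keyword->code list (no priority logic), then select the highest-priority collected code by scanning a priority-order list with a membership test.
import Mathlib
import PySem

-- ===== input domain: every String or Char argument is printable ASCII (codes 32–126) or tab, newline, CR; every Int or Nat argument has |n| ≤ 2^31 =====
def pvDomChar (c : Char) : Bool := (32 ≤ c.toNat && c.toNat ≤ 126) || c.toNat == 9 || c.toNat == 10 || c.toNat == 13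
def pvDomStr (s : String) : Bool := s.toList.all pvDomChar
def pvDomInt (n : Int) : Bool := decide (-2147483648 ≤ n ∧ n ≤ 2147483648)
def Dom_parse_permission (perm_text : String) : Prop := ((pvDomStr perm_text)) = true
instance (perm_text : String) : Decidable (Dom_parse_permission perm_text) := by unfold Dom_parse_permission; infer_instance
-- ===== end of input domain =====

-- ===== PORT A =====
-- B replaces A's prioritised if/elif grant chain by two separate passes: collect every
-- matching grant code from a flat keyword list, then pick the first code of a priority
-- order that was collected (alternative decomposition, same cost).
-- t.index("grants") is ported as PySem.Str.find: exact here since guarded by '"grants" in t'.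
def parse_permission (perm_text : String) : String :=
  if perm_text = "" then "prm:S"
  else
    let t := PySem.Str.lower perm_text
    let mode := if (["requires", "sequenced", "prior", "cannot standalone",
                     "not standalone", "only after", "must follow"]).any
                    (fun w => PySem.Str.isIn w t) then "Q" else "S"
    let grant :=
      if PySem.Str.isIn "grants" t then
        let grants_part := PySem.Str.slice t (some (PySem.Str.find t "grants")) none
        if (["escalat", "intensit"]).any (fun w => PySem.Str.isIn w grants_part) then "esc"
        else if (["trust", "channel"]).any (fun w => PySem.Str.isIn w grants_part) then "trt"
        else if (["identity", "self-concept", "shift"]).any (fun w => PySem.Str.isIn w grants_part) then "ids"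
        else if (["closure", "resolution", "path"]).any (fun w => PySem.Str.isIn w grants_part) then "cls"
        else if (["surveil", "ambient"]).any (fun w => PySem.Str.isIn w grants_part) then "asr"
        else if (["contact", "ongoing", "continued"]).any (fun w => PySem.Str.isIn w grants_part) then "sct"
        else if (["solved", "victory", "won"]).any (fun w => PySem.Str.isIn w grants_part) then "slv"
        else if (["knowledge", "knows", "learned", "experienced", "understanding"]).any (fun w => PySem.Str.isIn w grants_part) then "klg"
        else ""
      else ""
    "prm:" ++ mode ++ (if grant = "" then "" else "→" ++ grant)

-- ===== PORT B =====
def MODE_WORDS : List String :=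
  ["requires", "sequenced", "prior", "cannot standalone",
   "not standalone", "only after", "must follow"]

-- Flat keyword->code pairs; matching is done in one full pass with no priority logic.
def GRANT_KEYWORDS : List (String × String) :=
  [("escalat", "esc"), ("intensit", "esc"),
   ("trust", "trt"), ("channel", "trt"),
   ("identity", "ids"), ("self-concept", "ids"), ("shift", "ids"),
   ("closure", "cls"), ("resolution", "cls"), ("path", "cls"),
   ("surveil", "asr"), ("ambient", "asr"),
   ("contact", "sct"), ("ongoing", "sct"), ("continued", "sct"),
   ("solved", "slv"), ("victory", "slv"), ("won", "slv"),
   ("knowledge", "klg"), ("knows", "klg"), ("learned", "klg"),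
   ("experienced", "klg"), ("understanding", "klg")]

-- Priority order used in a second, separate selection pass over codes.
def GRANT_ORDER : List String := ["esc", "trt", "ids", "cls", "asr", "sct", "slv", "klg"]

def parse_permission_alt (perm_text : String) : String :=
  if perm_text = "" then "prm:S"
  else
    let t := PySem.Str.lower perm_text
    let mode := if MODE_WORDS.any (fun w => PySem.Str.isIn w t) then "Q" else "S"
    let grant :=
      if PySem.Str.isIn "grants" t then
        let grants_part := PySem.Str.slice t (some (PySem.Str.find t "grants")) none
        -- Phase 1: collect every matching grant code (no ordering logic here).
        let matched := (GRANT_KEYWORDS.filter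
          (fun e => PySem.Str.isIn e.1 grants_part)).map Prod.snd
        -- Phase 2: pick the highest-priority code among those collected.
        (GRANT_ORDER.findSome? (fun c =>
          if matched.contains c then some c else none)).getD ""
      else ""
    "prm:" ++ mode ++ (if grant = "" then "" else "→" ++ grant)

-- ===== PRECONDITION & SPEC =====
def Spec_parse_permission (perm_text : String) (out : String) : Prop := out = parse_permission_alt perm_text
instance (perm_text : String) (out : String) : Decidable (Spec_parse_permission perm_text out) := by unfold Spec_parse_permission; infer_instance

-- ===== CLAIM (what is proved, stated in full; the proofs are below) =====
def Claim_equal_parse_permission : Prop := ∀ (perm_text : String), Dom_parse_permission perm_text → Spec_parse_permission perm_text (parse_permission perm_text)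

-- ===== LEMMAS AND PROOFS =====

-- Membership of a code in the collected (filter-then-map) list, as a single any.
theorem contains_filter_map (p : String → Bool) (l : List (String × String)) (c : String) :
    (((l.filter (fun e => p e.1)).map Prod.snd).contains c)
      = l.any (fun e => p e.1 && (c == e.2)) := by
  induction l with
  | nil => rfl
  | cons h tl ih =>
    rw [List.filter_cons, List.any_cons]
    by_cases hp : p h.1
    · rw [if_pos hp, List.map_cons, List.contains_cons, ih, hp, Bool.true_and]
    · rw [if_neg hp, ih, eq_false_of_ne_true hp, Bool.false_and, Bool.false_or]

-- B's collect-then-select computation equals A's if/elif chain, for any haystack gp.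
set_option maxHeartbeats 1000000 in
theorem lookup_eq (gp : String) :
    ((GRANT_ORDER.findSome? (fun c =>
        if ((GRANT_KEYWORDS.filter
              (fun e => PySem.Str.isIn e.1 gp)).map Prod.snd).contains c
        then some c else none)).getD "") =
    (if (["escalat", "intensit"]).any (fun w => PySem.Str.isIn w gp) then "esc"
     else if (["trust", "channel"]).any (fun w => PySem.Str.isIn w gp) then "trt"
     else if (["identity", "self-concept", "shift"]).any (fun w => PySem.Str.isIn w gp) then "ids"
     else if (["closure", "resolution", "path"]).any (fun w => PySem.Str.isIn w gp) then "cls"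
     else if (["surveil", "ambient"]).any (fun w => PySem.Str.isIn w gp) then "asr"
     else if (["contact", "ongoing", "continued"]).any (fun w => PySem.Str.isIn w gp) then "sct"
     else if (["solved", "victory", "won"]).any (fun w => PySem.Str.isIn w gp) then "slv"
     else if (["knowledge", "knows", "learned", "experienced", "understanding"]).any (fun w => PySem.Str.isIn w gp) then "klg"
     else "") := by
  simp only [contains_filter_map (fun s => PySem.Str.isIn s gp)]
  simp only [GRANT_ORDER, GRANT_KEYWORDS, List.findSome?_cons, List.findSome?_nil,
    List.any_cons, List.any_nil, String.reduceBEq, beq_self_eq_true,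
    Bool.and_true, Bool.and_false, Bool.or_false, Bool.false_or]
  split_ifs <;> rfl

-- ===== VERDICT (by name: the statement is the Claim_ definition above) =====
theorem parse_permission_spec : Claim_equal_parse_permission := by
  intro s _
  unfold Spec_parse_permission
  simp only [parse_permission, parse_permission_alt, MODE_WORDS, lookup_eq]
  rfl
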